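-- pv_equiv track=rewrite | github.com/CIRISAI/CIRISManager | ciris_manager/llm_validator.py | _model_is_accessible
-- ===== SOURCE A (Python) =====
-- from typing import Optional, Tuple, List
--
-- def _model_is_accessible(requested_model: str, available_models: List[str]) -> bool:
--     """
--     Check if a model is accessible in the available models list.
--
--     Performs exact match and fuzzy matching for common variations.
--     """
--     # Exact match
--     if requested_model in available_models:
--         return True
--
--     # Lowercase match
--     requested_lower = requested_model.lower()
--     for model in available_models:
--         if model.lower() == requested_lower:
--             return True
--
--     # Partial match for models with version suffixes
--     # e.g., "gpt-4o" might match "gpt-4o-2024-08-06"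
--     for model in available_models:
--         if model.lower().startswith(requested_lower):
--             return True
--         if requested_lower.startswith(model.lower()):
--             return True
--
--     return False
-- ===== SOURCE B (Python) =====
-- from typing import List
--
-- def _model_is_accessible(requested_model: str, available_models: List[str]) -> bool:
--     # A model matches iff, after lowercasing, one name is a prefix of the
--     # other -- equivalently, the two names agree on their first
--     # min(len, len) characters.  (Exact and case-insensitive equality are
--     # special cases of this single common-prefix test.)
--     requested_lower = requested_model.lower()
--     for model in available_models:
--         model_lower = model.lower()
--         k = min(len(model_lower), len(requested_lower))
--         if model_lower[:k] == requested_lower[:k]: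
--             return True
--     return False
-- ===== Notes on version B (the rewrite author's own statement) =====
-- stated objective: simpler
-- what changed: Replaces A's three staged scans over four equality/prefix tests by one scan with a single common-prefix test: the names match iff their lowercased forms agree on the first min-length characters, which subsumes exact match, case-insensitive match and both startswith directions.
import Mathlib
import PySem

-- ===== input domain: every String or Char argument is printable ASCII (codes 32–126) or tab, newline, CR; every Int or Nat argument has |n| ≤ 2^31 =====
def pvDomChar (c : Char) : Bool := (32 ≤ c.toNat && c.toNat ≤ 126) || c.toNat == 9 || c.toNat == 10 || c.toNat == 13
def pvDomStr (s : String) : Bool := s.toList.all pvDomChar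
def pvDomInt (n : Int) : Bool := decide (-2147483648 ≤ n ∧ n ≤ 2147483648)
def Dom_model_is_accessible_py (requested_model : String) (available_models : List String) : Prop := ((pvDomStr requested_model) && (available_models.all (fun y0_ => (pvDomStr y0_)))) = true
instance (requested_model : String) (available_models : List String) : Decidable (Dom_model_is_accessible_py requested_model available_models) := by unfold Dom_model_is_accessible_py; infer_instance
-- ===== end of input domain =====

-- B replaces A's three staged scans (exact membership, lowercase-equality, two startswith
-- directions) by one scan with a single common-prefix test on the lowercased names; simpler.

-- ===== PORT A =====
-- A: exact-membership check, then a lowercase-equality scan, then a prefix scan.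
def model_is_accessible_py (requested_model : String) (available_models : List String) : Bool :=
  if available_models.contains requested_model then true
  else
    let requested_lower := PySem.Str.lower requested_model
    if available_models.any (fun model => PySem.Str.lower model == requested_lower) then true
    else if available_models.any (fun model =>
        PySem.Str.startswith (PySem.Str.lower model) requested_lower
        || PySem.Str.startswith requested_lower (PySem.Str.lower model)) then true
    else false

-- ===== PORT B =====
-- B: one scan; match iff the lowercased names agree on their first min-length characters.
def model_is_accessible_py_alt (requested_model : String) (available_models : List String) : Bool :=
  let requested_lower := PySem.Str.lower requested_model
  available_models.any (fun model =>
    let model_lower := PySem.Str.lower model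
    let k := min (PySem.Str.len model_lower) (PySem.Str.len requested_lower)
    PySem.Str.slice model_lower none (some k) == PySem.Str.slice requested_lower none (some k))

-- ===== PRECONDITION & SPEC =====
def Spec_model_is_accessible_py (requested_model : String) (available_models : List String) (out : Bool) : Prop := out = model_is_accessible_py_alt requested_model available_models
instance (requested_model : String) (available_models : List String) (out : Bool) : Decidable (Spec_model_is_accessible_py requested_model available_models out) := by unfold Spec_model_is_accessible_py; infer_instance

-- ===== CLAIM (what is proved, stated in full; the proofs are below) =====
def Claim_equal_model_is_accessible_py : Prop := ∀ (requested_model : String) (available_models : List String), Dom_model_is_accessible_py requested_model available_models → Spec_model_is_accessible_py requested_model available_models (model_is_accessible_py requested_model available_models)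

-- ===== LEMMAS AND PROOFS =====

lemma any_split {α : Type} (l : List α) (f g : α → Bool) :
    l.any (fun x => f x || g x) = (l.any f || l.any g) := by
  induction l with
  | nil => rfl
  | cons a t ih => simp [List.any_cons, ih]; ac_rfl

-- A's staged if-chain (membership, then two scans) as one scan over a three-way disjunct
lemma staged_any {α : Type} [BEq α] [LawfulBEq α] (r : α) (ms : List α) (g h : α → Bool) :
    (if ms.contains r then true
     else if ms.any g then true
     else if ms.any h then true
     else false)
    = ms.any (fun m => m == r || (g m || h m)) := by
  rw [show (fun m => m == r || (g m || h m))
      = (fun m => (fun x => x == r) m || ((fun x => g x || h x) m)) from rfl]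
  rw [any_split]
  rw [show (fun x => g x || h x) = (fun x => g x || h x) from rfl, any_split]
  rw [List.any_beq']
  cases ms.contains r <;> cases ms.any g <;> cases ms.any h <;> simp

-- mutual-prefix ↔ agreement on the first min-length characters
lemma prefix_or_iff_take_min {α : Type} (L : List α) : ∀ (R : List α),
    (R <+: L ∨ L <+: R) ↔
      L.take (min L.length R.length) = R.take (min L.length R.length) := by
  induction L with
  | nil => intro R; simp
  | cons a L ih =>
    intro R
    cases R with
    | nil => simp
    | cons b R =>
      simp only [List.cons_prefix_cons, List.length_cons, Nat.succ_min_succ,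
        List.take_succ_cons, List.cons.injEq]
      constructor
      · rintro (⟨hb, hp⟩ | ⟨hb, hp⟩)
        · exact ⟨hb.symm, (ih R).mp (Or.inl hp)⟩
        · exact ⟨hb, (ih R).mp (Or.inr hp)⟩
      · rintro ⟨hb, hp⟩
        rcases (ih R).mpr hp with h | h
        · exact Or.inl ⟨hb.symm, h⟩
        · exact Or.inr ⟨hb, h⟩

lemma toList_slice_take (s : String) (k : Nat) :
    (PySem.Str.slice s none (some (k : Int))).toList = s.toList.take k := by
  simp [PySem.Str.toList_slice, PySem.Chars.slice_eq_listSlice, PySem.List.slice_to_natCast]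

lemma slice_beq_eq_take (s t : String) (k : Nat) :
    (PySem.Str.slice s none (some (k : Int)) == PySem.Str.slice t none (some (k : Int)))
    = decide (s.toList.take k = t.toList.take k) := by
  apply Bool.eq_iff_iff.mpr
  simp only [beq_iff_eq, decide_eq_true_eq]
  constructor
  · intro h
    have := congrArg String.toList h
    simpa [toList_slice_take] using this
  · intro h
    exact String.ext (by simpa [toList_slice_take] using h)

-- A's four per-element tests, combined, equal B's single common-prefix test.
lemma elem_cond_eq (r m : String) :
    (m == r
      || (PySem.Str.lower m == PySem.Str.lower r
      || (PySem.Str.startswith (PySem.Str.lower m) (PySem.Str.lower r)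
          || PySem.Str.startswith (PySem.Str.lower r) (PySem.Str.lower m))))
    = (PySem.Str.slice (PySem.Str.lower m) none
          (some (min (PySem.Str.len (PySem.Str.lower m)) (PySem.Str.len (PySem.Str.lower r))))
        == PySem.Str.slice (PySem.Str.lower r) none
          (some (min (PySem.Str.len (PySem.Str.lower m)) (PySem.Str.len (PySem.Str.lower r))))) := by
  have hK : min (PySem.Str.len (PySem.Str.lower m)) (PySem.Str.len (PySem.Str.lower r))
      = ((min (PySem.Str.lower m).toList.length (PySem.Str.lower r).toList.length : Nat) : Int) := by
    simp [PySem.Str.len_eq, Nat.cast_min]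
  rw [hK, slice_beq_eq_take]
  apply Bool.eq_iff_iff.mpr
  simp only [Bool.or_eq_true, beq_iff_eq, PySem.Str.startswith_eq,
    PySem.Chars.startswith_iff, decide_eq_true_eq]
  constructor
  · rintro (h | h | h | h)
    · simp [h]
    · simp [h]
    · exact (prefix_or_iff_take_min _ _).mp (Or.inl h)
    · exact (prefix_or_iff_take_min _ _).mp (Or.inr h)
  · intro h
    rcases (prefix_or_iff_take_min _ _).mpr h with h' | h'
    · exact Or.inr (Or.inr (Or.inl h'))
    · exact Or.inr (Or.inr (Or.inr h'))

-- ===== VERDICT (by name: the statement is the Claim_ definition above) =====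
theorem model_is_accessible_py_spec : Claim_equal_model_is_accessible_py := by
  intro r ms _
  unfold Spec_model_is_accessible_py
  calc model_is_accessible_py r ms
      = ms.any (fun m => m == r
          || ((fun x => PySem.Str.lower x == PySem.Str.lower r) m
            || (fun x => PySem.Str.startswith (PySem.Str.lower x) (PySem.Str.lower r)
                || PySem.Str.startswith (PySem.Str.lower r) (PySem.Str.lower x)) m)) := by
        unfold model_is_accessible_py
        exact staged_any r ms _ _
    _ = model_is_accessible_py_alt r ms := by
        unfold model_is_accessible_py_alt
        exact List.any_congr rfl (fun m => elem_cond_eq r m)
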